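-- pv_equiv track=rewrite | github.com/hariaravind03/LEET-CODE | Difficulty: Easy/Recursively print all sentences that can be formed from list of word lists/recursively-print-all-sentences-that-can-be-formed-from-list-of-word-lists.py | sentences
-- ===== SOURCE A (Python) =====
-- from typing import List
-- from typing import List
--
-- def sentences(list: List[List[str]]) -> List[List[str]]:
--     def helper(index, current):
--         # Base case: if all lists have been processed, return the current sentence
--         if index == len(list):
--             return [current]
--
--         # Recursive case: take the words from the current list and build sentences
--         result = []
--         for word in list[index]:
--             result.extend(helper(index + 1, current + [word]))
--         return result
--
--     return helper(0, [])
-- ===== SOURCE B (Python) =====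
-- from typing import List
--
-- def sentences(list: List[List[str]]) -> List[List[str]]:
--     # Iterative Cartesian product: extend each partial sentence by each word,
--     # first list varies slowest (matches the recursive order).
--     result = [[]]
--     for wordlist in list:
--         result = [partial + [word] for partial in result for word in wordlist]
--     return result
-- ===== Notes on version B (the rewrite author's own statement) =====
-- stated objective: alternative
-- what changed: Replaced the index-based recursion (DFS with extend) by an iterative left fold building the Cartesian product of partial sentences.
import Mathlib
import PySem

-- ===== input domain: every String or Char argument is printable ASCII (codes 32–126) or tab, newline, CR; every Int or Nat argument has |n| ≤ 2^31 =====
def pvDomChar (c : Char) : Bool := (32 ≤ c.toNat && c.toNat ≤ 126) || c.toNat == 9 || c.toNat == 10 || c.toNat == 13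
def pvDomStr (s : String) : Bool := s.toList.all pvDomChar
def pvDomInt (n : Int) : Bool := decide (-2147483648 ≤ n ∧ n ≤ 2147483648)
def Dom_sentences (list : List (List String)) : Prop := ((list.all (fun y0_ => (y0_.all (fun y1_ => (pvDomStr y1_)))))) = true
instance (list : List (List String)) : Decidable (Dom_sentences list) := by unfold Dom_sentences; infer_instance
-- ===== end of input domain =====

-- B builds the product iteratively with a left fold instead of A's index recursion; alternative decomposition, same cost.
-- ===== PORT A =====
-- helper(index, current): recursion on the remaining suffix of lists (index ↦ drop index);
-- the inner 'for word … result.extend(…)' is the foldl accumulating 'result'.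
def sentencesHelper (rest : List (List String)) (current : List String) : List (List String) :=
  match rest with
  | [] => [current]
  | ws :: rest' => ws.foldl (fun result word => result ++ sentencesHelper rest' (current ++ [word])) []

def sentences (list : List (List String)) : List (List String) :=
  sentencesHelper list []

-- ===== PORT B =====
-- result = [[]]; for wordlist in list: result = [p + [w] for p in result for w in wordlist]
def sentences_alt (list : List (List String)) : List (List String) :=
  list.foldl (fun result wordlist => result.flatMap (fun partial_ => wordlist.map (fun word => partial_ ++ [word]))) [[]]

-- ===== PRECONDITION & SPEC =====
def Spec_sentences (list : List (List String)) (out : List (List String)) : Prop := out = sentences_alt list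
instance (list : List (List String)) (out : List (List String)) : Decidable (Spec_sentences list out) := by unfold Spec_sentences; infer_instance

-- ===== CLAIM (what is proved, stated in full; the proofs are below) =====
def Claim_equal_sentences : Prop := ∀ (list : List (List String)), Dom_sentences list → Spec_sentences list (sentences list)

-- ===== LEMMAS AND PROOFS =====

theorem step_append (rest : List (List String)) (xs ys : List (List String)) :
    rest.foldl (fun result wordlist => result.flatMap (fun partial_ => wordlist.map (fun word => partial_ ++ [word]))) (xs ++ ys)
    = rest.foldl (fun result wordlist => result.flatMap (fun partial_ => wordlist.map (fun word => partial_ ++ [word]))) xs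
      ++ rest.foldl (fun result wordlist => result.flatMap (fun partial_ => wordlist.map (fun word => partial_ ++ [word]))) ys := by
  induction rest generalizing xs ys with
  | nil => simp
  | cons ws rest ih => simp [List.flatMap_append, ih]

theorem step_nil (rest : List (List String)) :
    rest.foldl (fun result wordlist => result.flatMap (fun partial_ => wordlist.map (fun word => partial_ ++ [word]))) [] = [] := by
  induction rest with
  | nil => rfl
  | cons ws rest ih => simpa using ih

theorem foldl_extend_eq_flatMap (ws : List String) (f : String → List (List String)) :
    ws.foldl (fun result word => result ++ f word) [] = ws.flatMap f := by
  suffices h : ∀ acc, ws.foldl (fun result word => result ++ f word) acc = acc ++ ws.flatMap f by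
    simpa using h []
  induction ws with
  | nil => simp
  | cons w ws ih => intro acc; simp [ih, List.append_assoc]

theorem helper_eq (rest : List (List String)) (current : List String) :
    sentencesHelper rest current
    = rest.foldl (fun result wordlist => result.flatMap (fun partial_ => wordlist.map (fun word => partial_ ++ [word]))) [current] := by
  induction rest generalizing current with
  | nil => simp [sentencesHelper]
  | cons ws rest ih =>
    rw [sentencesHelper, foldl_extend_eq_flatMap]
    simp only [List.foldl_cons, List.flatMap_singleton]
    induction ws with
    | nil => simpa using (step_nil rest).symm
    | cons w ws ihw =>
      simp only [List.flatMap_cons, List.map_cons]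
      rw [ih, ihw]
      exact (step_append rest [current ++ [w]] (ws.map (fun word => current ++ [word]))).symm

-- ===== VERDICT (by name: the statement is the Claim_ definition above) =====
theorem sentences_spec : Claim_equal_sentences := by
  intro list _
  unfold Spec_sentences sentences sentences_alt
  exact helper_eq list []
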